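-- pv_equiv track=rewrite | github.com/JiangYuTS/DPConCFil | DPConCFil_2D_Code/Filament_Class_Funs_Analysis.py | Search_Max_Path_And_Edges
-- ===== SOURCE A (Python) =====
-- def Search_Max_Path_And_Edges(paths_and_weights):
--     max_path = []
--     max_edges = []
--     if len(paths_and_weights) != 0:
--         max_weight = max([weight for path, weight in paths_and_weights])
--         max_path = [path for path, weight in paths_and_weights if weight == max_weight][0]
--         max_edges = [(max_path[i], max_path[i+1]) for i in range(len(max_path)-1)]
--     return max_weight,max_path,max_edges
-- ===== SOURCE B (Python) =====
-- def Search_Max_Path_And_Edges(paths_and_weights):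
--     # single pass: running best (strict '>' keeps the FIRST maximal entry)
--     best_path, best_weight = paths_and_weights[0]
--     for path, weight in paths_and_weights[1:]:
--         if weight > best_weight:
--             best_path, best_weight = path, weight
--     max_edges = list(zip(best_path, best_path[1:]))
--     return best_weight, best_path, max_edges
-- ===== Notes on version B (the rewrite author's own statement) =====
-- stated objective: alternative
-- what changed: Replaces A's three passes (max over a weight list, a filter scan for the first maximal path, an index loop for edges) with one running-best fold over the list and a zip for the edges; same asymptotic cost.
-- outside the precondition, e.g. on Search_Max_Path_And_Edges([]): A raises UnboundLocalError, B raises IndexError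
import Mathlib
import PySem

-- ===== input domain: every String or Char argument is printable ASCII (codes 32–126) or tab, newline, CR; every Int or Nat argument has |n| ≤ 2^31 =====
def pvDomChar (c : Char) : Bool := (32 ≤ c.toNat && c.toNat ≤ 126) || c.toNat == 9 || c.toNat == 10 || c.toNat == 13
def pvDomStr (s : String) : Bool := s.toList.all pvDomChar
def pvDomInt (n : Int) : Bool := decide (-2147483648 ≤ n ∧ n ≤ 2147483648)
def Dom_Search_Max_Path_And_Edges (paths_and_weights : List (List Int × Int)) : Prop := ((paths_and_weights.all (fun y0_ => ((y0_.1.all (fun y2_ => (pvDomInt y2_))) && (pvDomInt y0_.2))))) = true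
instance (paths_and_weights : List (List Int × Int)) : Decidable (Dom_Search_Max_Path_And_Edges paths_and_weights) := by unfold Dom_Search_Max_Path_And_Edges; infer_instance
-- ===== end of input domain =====

-- B replaces A's three passes (max of the weight list, filter scan for the first maximal
-- path, index loop for the edges) with one running-best fold and a zip.

-- ===== PORT A =====
def Search_Max_Path_And_Edges (paths_and_weights : List (List Int × Int)) : Int × List Int × (List (Int × Int)) :=
  if paths_and_weights.length ≠ 0 then
    -- max_weight = max([weight for path, weight in paths_and_weights])
    match PySem.List.max? (paths_and_weights.map (fun pr => pr.2)) (fun w => w) with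
    | none => (0, [], [])        -- unreachable: the guard makes the weight list nonempty
    | some max_weight =>
      -- max_path = [path for path, weight in paths_and_weights if weight == max_weight][0]
      match PySem.List.pyGet? ((paths_and_weights.filter (fun pr => pr.2 == max_weight)).map (fun pr => pr.1)) 0 with
      | none => (0, [], [])      -- unreachable: the maximum occurs in the list
      | some max_path =>
        -- max_edges = [(max_path[i], max_path[i+1]) for i in range(len(max_path)-1)]
        let max_edges := (PySem.List.pyRange 0 ((max_path.length : Int) - 1) 1).map
          (fun i => (PySem.List.pyGetD max_path i 0, PySem.List.pyGetD max_path (i + 1) 0))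
        (max_weight, max_path, max_edges)
  else (0, [], [])               -- unreachable under Pre_: Python A raises UnboundLocalError on []

-- ===== PORT B =====
def Search_Max_Path_And_Edges_alt (paths_and_weights : List (List Int × Int)) : Int × List Int × (List (Int × Int)) :=
  match paths_and_weights with
  | [] => (0, [], [])            -- unreachable under Pre_: Python B raises IndexError on []
  | b :: rest =>                 -- best_path, best_weight = paths_and_weights[0]; loop over paths_and_weights[1:]
    let best := rest.foldl (fun (b : List Int × Int) pr => if pr.2 > b.2 then pr else b) b
    -- max_edges = list(zip(best_path, best_path[1:]))
    (best.2, best.1, best.1.zip best.1.tail)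

-- ===== PRECONDITION & SPEC =====
-- Pre_ excludes only the empty list, on which both Pythons raise (A: UnboundLocalError, B: IndexError).
def Pre_Search_Max_Path_And_Edges (paths_and_weights : List (List Int × Int)) : Prop :=
  paths_and_weights ≠ []
instance (paths_and_weights : List (List Int × Int)) : Decidable (Pre_Search_Max_Path_And_Edges paths_and_weights) := by unfold Pre_Search_Max_Path_And_Edges; infer_instance

def pvWitness_Search_Max_Path_And_Edges : (List (List Int × Int)) := [([1, 2], 5), ([3], 5)]

def Spec_Search_Max_Path_And_Edges (paths_and_weights : List (List Int × Int)) (out : Int × List Int × (List (Int × Int))) : Prop := out = Search_Max_Path_And_Edges_alt paths_and_weights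
instance (paths_and_weights : List (List Int × Int)) (out : Int × List Int × (List (Int × Int))) : Decidable (Spec_Search_Max_Path_And_Edges paths_and_weights out) := by unfold Spec_Search_Max_Path_And_Edges; infer_instance

-- ===== CLAIM (what is proved, stated in full; the proofs are below) =====
def Claim_equal_Search_Max_Path_And_Edges : Prop := ∀ (paths_and_weights : List (List Int × Int)), Dom_Search_Max_Path_And_Edges paths_and_weights → Pre_Search_Max_Path_And_Edges paths_and_weights → Spec_Search_Max_Path_And_Edges paths_and_weights (Search_Max_Path_And_Edges paths_and_weights)

-- ===== LEMMAS AND PROOFS =====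

-- The running-best fold returns the FIRST element of b :: rest whose weight equals the
-- overall maximum weight (strict '>' never replaces on ties).
theorem fold_best_eq_find (rest : List (List Int × Int)) (b : List Int × Int) :
    some (rest.foldl (fun (b : List Int × Int) pr => if pr.2 > b.2 then pr else b) b)
      = (b :: rest).find? (fun pr => pr.2 == (rest.map (fun pr => pr.2)).foldl max b.2) := by
  induction rest generalizing b with
  | nil => simp
  | cons pr t ih =>
    have hle : ∀ (a : Int), a ≤ (t.map (fun pr => pr.2)).foldl max a :=
      fun a => (PySem.List.le_foldl_max (t.map (fun pr => pr.2)) a).1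
    by_cases h : pr.2 > b.2
    · have hmax : max b.2 pr.2 = pr.2 := by omega
      have hb : ¬ (b.2 = (t.map (fun pr => pr.2)).foldl max pr.2) := by
        have := hle pr.2; omega
      simp only [List.foldl_cons, List.map_cons, if_pos h, ih pr, hmax]
      conv_rhs => rw [List.find?_cons_of_neg (by simpa using hb)]
    · have hmax : max b.2 pr.2 = b.2 := by omega
      simp only [List.foldl_cons, List.map_cons, if_neg h, ih b, hmax]
      by_cases hb : b.2 = (t.map (fun pr => pr.2)).foldl max b.2
      · rw [List.find?_cons_of_pos (by simpa using hb),
          List.find?_cons_of_pos (by simpa using hb)]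
      · have hpr : ¬ (pr.2 = (t.map (fun pr => pr.2)).foldl max b.2) := by
          have := hle b.2; omega
        rw [List.find?_cons_of_neg (by simpa using hb)]
        conv_rhs => rw [List.find?_cons_of_neg (by simpa using hb),
          List.find?_cons_of_neg (by simpa using hpr)]

-- A's edge list built from indices equals zip with the tail.
theorem edges_eq_zip (l : List Int) :
    (PySem.List.pyRange 0 ((l.length : Int) - 1) 1).map
      (fun i => (PySem.List.pyGetD l i 0, PySem.List.pyGetD l (i + 1) 0))
      = l.zip l.tail := by
  cases l with
  | nil => rfl
  | cons a t =>
    have h : (((a :: t).length : Int)) - 1 = ((t.length : Nat) : Int) := by simp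
    rw [h, PySem.List.pyRange_zero_natCast, List.map_map]
    apply List.ext_getElem
    · simp
    · intro i h1 h2
      have hi : (i : Int) + 1 = ((i + 1 : Nat) : Int) := by push_cast; ring
      simp only [List.getElem_map, List.getElem_range, Function.comp_apply, hi,
        PySem.List.pyGetD_natCast, List.getElem_zip, List.getElem_tail]
      simp at h1
      rw [List.getD_eq_getElem _ _ (by simp; omega), List.getD_eq_getElem _ _ (by simp; omega)]

-- xs[0] succeeds exactly on the head.
theorem pyGet?_zero_eq_head? (xs : List (List Int)) : PySem.List.pyGet? xs 0 = xs.head? := by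
  cases xs <;> simp [PySem.List.pyGet?, PySem.List.pyIdx?]

-- ===== VERDICT (by name: the statement is the Claim_ definition above) =====
theorem Search_Max_Path_And_Edges_spec : Claim_equal_Search_Max_Path_And_Edges := by
  intro pw _ hpre
  unfold Spec_Search_Max_Path_And_Edges
  match pw with
  | [] => exact absurd rfl hpre
  | b :: rest =>
    have hfind := (fold_best_eq_find rest b).symm
    have hp := List.find?_some hfind
    have hbest2 : (rest.foldl (fun (b : List Int × Int) pr => if pr.2 > b.2 then pr else b) b).2
        = (rest.map (fun pr => pr.2)).foldl max b.2 := by simpa using hp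
    have hget : PySem.List.pyGet? (((b :: rest).filter
        (fun pr => pr.2 == (rest.map (fun pr => pr.2)).foldl max b.2)).map (fun pr => pr.1)) 0
        = some (rest.foldl (fun (b : List Int × Int) pr => if pr.2 > b.2 then pr else b) b).1 := by
      rw [pyGet?_zero_eq_head?, List.head?_map, List.head?_filter, hfind, Option.map_some]
    simp only [Search_Max_Path_And_Edges, Search_Max_Path_And_Edges_alt,
      List.map_cons, PySem.List.max?_id_cons, hget, edges_eq_zip, hbest2,
      if_pos (by simp : (b :: rest).length ≠ 0)]
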